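-- pv_equiv track=rewrite | github.com/fa1c4/FuzzArchiving | oss-fuzz-scripts/batch_ossfuzz_run/batch_ossfuzz_tmux.py | infer_status_from_log
-- ===== SOURCE A (Python) =====
-- def infer_status_from_log(text: str) -> str:
--     lowered = text.lower()
--     if not text.strip():
--         return "failed"
--
--     crash_markers = [
--         "addresssanitizer",
--         "undefinedbehaviorsanitizer",
--         "memorysanitizer",
--         "test unit written to",
--         "artifact_prefix",
--         "crash",
--         "leak",
--         "timeout",
--         "oom",
--         "slow-unit",
--     ]
--     if any(marker in lowered for marker in crash_markers):
--         return "crash"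
--     return "finished"
-- ===== SOURCE B (Python) =====
-- _CRASH_MARKERS = [
--     "addresssanitizer",
--     "undefinedbehaviorsanitizer",
--     "memorysanitizer",
--     "test unit written to",
--     "artifact_prefix",
--     "crash",
--     "leak",
--     "timeout",
--     "oom",
--     "slow-unit",
-- ]
--
--
-- def _build_trie(words):
--     root = {}
--     for w in words:
--         node = root
--         for ch in w:
--             node = node.setdefault(ch, {})
--         node[""] = True  # terminal mark
--     return root
--
--
-- _TRIE = _build_trie(_CRASH_MARKERS)
--
--
-- def _walk(node, text, i):
--     # does some marker (a terminal path of the trie) start at position i?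
--     while True:
--         if "" in node:
--             return True
--         if i >= len(text):
--             return False
--         nxt = node.get(text[i])
--         if nxt is None:
--             return False
--         node = nxt
--         i += 1
--
--
-- def infer_status_from_log(text: str) -> str:
--     if not text.strip():
--         return "failed"
--     lowered = text.lower()
--     if any(_walk(_TRIE, lowered, i) for i in range(len(lowered))):
--         return "crash"
--     return "finished"
-- ===== Notes on version B (the rewrite author's own statement) =====
-- stated objective: alternative
-- what changed: B builds a prefix trie (nested dicts) of the crash markers once and, at each position of the text, walks the trie instead of testing each marker's substring membership separately, so the per-marker scan disappears.
import Mathlib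
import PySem

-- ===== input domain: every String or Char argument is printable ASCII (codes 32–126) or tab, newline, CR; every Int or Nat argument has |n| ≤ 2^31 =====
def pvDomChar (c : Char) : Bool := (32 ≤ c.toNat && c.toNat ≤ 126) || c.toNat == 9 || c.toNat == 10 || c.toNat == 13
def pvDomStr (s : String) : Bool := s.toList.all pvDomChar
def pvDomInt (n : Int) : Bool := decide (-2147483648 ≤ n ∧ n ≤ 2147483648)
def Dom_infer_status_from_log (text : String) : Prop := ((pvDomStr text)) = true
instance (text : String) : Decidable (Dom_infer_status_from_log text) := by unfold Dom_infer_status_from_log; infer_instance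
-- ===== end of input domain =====

-- B builds a prefix trie of the crash markers once and walks it at each text position,
-- replacing A's per-marker substring membership tests (alternative data structure, same results).

-- ===== PORT A =====
def crashMarkersA : List (List Char) :=
  [ "addresssanitizer".toList, "undefinedbehaviorsanitizer".toList, "memorysanitizer".toList,
    "test unit written to".toList, "artifact_prefix".toList, "crash".toList, "leak".toList,
    "timeout".toList, "oom".toList, "slow-unit".toList ]

def infer_status_from_log (text : String) : String :=
  let lowered := PySem.Chars.lower text.toList
  if PySem.Chars.strip text.toList = [] then "failed"
  else if crashMarkersA.any (fun m => PySem.Chars.isIn m lowered) then "crash"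
  else "finished"

-- ===== PORT B =====
-- the trie of Source B: a node is a terminal flag plus an (ordered) child list (a mutual pair,
-- mirroring Source B's nested dicts with the "" terminal key)
mutual
inductive Trie where
  | node : Bool → TChildren → Trie
inductive TChildren where
  | nil : TChildren
  | cons : Char → Trie → TChildren → TChildren
end

def emptyTrie : Trie := .node false .nil

-- Source B's _build_trie: insert each marker character by character
-- (setdefault = fetch-or-default child, insert into it, store it back)
def findChild : TChildren → Char → Option Trie
  | .nil, _ => none
  | .cons k t ch, c => if k = c then some t else findChild ch c

def setChild : TChildren → Char → Trie → TChildren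
  | .nil, c, t => .cons c t .nil
  | .cons k t0 ch, c, t => if k = c then .cons k t ch else .cons k t0 (setChild ch c t)

def trieInsert : Trie → List Char → Trie
  | .node _ ch, [] => .node true ch
  | .node b ch, c :: rest =>
    .node b (setChild ch c (trieInsert ((findChild ch c).getD emptyTrie) rest))

def crashMarkersB : List (List Char) :=
  [ "addresssanitizer".toList, "undefinedbehaviorsanitizer".toList, "memorysanitizer".toList,
    "test unit written to".toList, "artifact_prefix".toList, "crash".toList, "leak".toList,
    "timeout".toList, "oom".toList, "slow-unit".toList ]

def builtTrie : Trie := crashMarkersB.foldl trieInsert emptyTrie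

-- Source B's _walk: terminal? end of text? follow the child edge
def walk : List Char → Trie → Bool
  | l, .node b ch =>
    if b then true
    else
      match l with
      | [] => false
      | c :: rest =>
        match findChild ch c with
        | some t => walk rest t
        | none => false

def infer_status_from_log_alt (text : String) : String :=
  if PySem.Chars.strip text.toList = [] then "failed"
  else
    let lowered := PySem.Chars.lower text.toList
    if (List.range lowered.length).any (fun i => walk (lowered.drop i) builtTrie) then "crash"
    else "finished"

-- ===== PRECONDITION & SPEC =====
def Spec_infer_status_from_log (text : String) (out : String) : Prop := out = infer_status_from_log_alt text
instance (text : String) (out : String) : Decidable (Spec_infer_status_from_log text out) := by unfold Spec_infer_status_from_log; infer_instance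

-- ===== CLAIM (what is proved, stated in full; the proofs are below) =====
def Claim_equal_infer_status_from_log : Prop := ∀ (text : String), Dom_infer_status_from_log text → Spec_infer_status_from_log text (infer_status_from_log text)

-- ===== LEMMAS AND PROOFS =====

-- the words spelled by a trie (proof-side characterisation)
mutual
def words : Trie → List (List Char)
  | .node b ch => (if b then [([] : List Char)] else []) ++ wordsC ch
def wordsC : TChildren → List (List Char)
  | .nil => []
  | .cons c t ch => (words t).map (c :: ·) ++ wordsC ch
end

def hasKey : TChildren → Char → Bool
  | .nil, _ => false
  | .cons k _ ch, c => k == c || hasKey ch c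

-- well-formed: child keys distinct at every node
mutual
def wfT : Trie → Bool
  | .node _ ch => wfC ch
def wfC : TChildren → Bool
  | .nil => true
  | .cons k t ch => !hasKey ch k && wfT t && wfC ch
end

theorem wordsC_ne_nil : ∀ (ch : TChildren), [] ∉ wordsC ch
  | .nil => by simp [wordsC]
  | .cons k t ch => by
      have ih := wordsC_ne_nil ch
      simp [wordsC, List.mem_append, List.mem_map, ih]

theorem head_mem_wordsC : ∀ (ch : TChildren) (c : Char) (w : List Char),
    (c :: w) ∈ wordsC ch → hasKey ch c = true
  | .nil, c, w => by simp [wordsC]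
  | .cons k t ch, c, w => by
      intro h
      simp only [wordsC, List.mem_append, List.mem_map] at h
      rcases h with ⟨x, _, hkx⟩ | h
      · have : k = c := by injection hkx
        simp [hasKey, this]
      · simp [hasKey, head_mem_wordsC ch c w h]

theorem children_iff (rest : List Char) (c : Char)
    (IH : ∀ t : Trie, wfT t = true → (walk rest t = true ↔ ∃ m ∈ words t, m <+: rest)) :
    ∀ ch : TChildren, wfC ch = true →
      ((match findChild ch c with | some t => walk rest t | none => false) = true
        ↔ ∃ m ∈ wordsC ch, m <+: c :: rest)
  | .nil, _ => by simp [findChild, wordsC]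
  | .cons k t ch, hwf => by
      have hcomp : (hasKey ch k = false ∧ wfT t = true) ∧ wfC ch = true := by
        simpa [wfC, Bool.and_eq_true, Bool.not_eq_true'] using hwf
      obtain ⟨⟨hkey, hwt⟩, hwc⟩ := hcomp
      by_cases hkc : k = c
      · subst hkc
        rw [show findChild (TChildren.cons k t ch) k = some t from by simp [findChild]]
        show walk rest t = true ↔ _
        rw [IH t hwt]
        simp only [wordsC, List.mem_append, List.mem_map]
        constructor
        · rintro ⟨w, hw, hp⟩
          exact ⟨k :: w, Or.inl ⟨w, hw, rfl⟩, List.cons_prefix_cons.mpr ⟨rfl, hp⟩⟩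
        · rintro ⟨m, hmem, hp⟩
          rcases hmem with ⟨x, hx, rfl⟩ | hm
          · exact ⟨x, hx, (List.cons_prefix_cons.mp hp).2⟩
          · cases m with
            | nil => exact absurd hm (wordsC_ne_nil ch)
            | cons c₀ w =>
              have hc₀ : c₀ = k := (List.cons_prefix_cons.mp hp).1
              subst hc₀
              exact absurd (head_mem_wordsC ch _ w hm) (by simp [hkey])
      · rw [show findChild (TChildren.cons k t ch) c = findChild ch c from by
            simp [findChild, hkc]]
        rw [children_iff rest c IH ch hwc]
        simp only [wordsC, List.mem_append, List.mem_map]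
        constructor
        · rintro ⟨m, hm, hp⟩
          exact ⟨m, Or.inr hm, hp⟩
        · rintro ⟨m, hmem, hp⟩
          rcases hmem with ⟨x, hx, rfl⟩ | hm
          · exact absurd (List.cons_prefix_cons.mp hp).1 hkc
          · exact ⟨m, hm, hp⟩

theorem walk_iff : ∀ (l : List Char) (t : Trie), wfT t = true →
    (walk l t = true ↔ ∃ m ∈ words t, m <+: l) := by
  intro l
  induction l with
  | nil =>
    intro t hw
    cases t with
    | node b ch =>
      cases b with
      | true =>
        exact iff_of_true (by simp [walk]) ⟨[], by simp [words], List.nil_prefix⟩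
      | false =>
        refine iff_of_false (by simp [walk]) ?_
        rintro ⟨m, hm, hp⟩
        rw [List.prefix_nil] at hp
        subst hp
        have hm' : [] ∈ wordsC ch := by simpa [words] using hm
        exact absurd hm' (wordsC_ne_nil ch)
  | cons c rest ih =>
    intro t hw
    cases t with
    | node b ch =>
      cases b with
      | true =>
        exact iff_of_true (by simp [walk]) ⟨[], by simp [words], List.nil_prefix⟩
      | false =>
        have hwc : wfC ch = true := by simpa [wfT] using hw
        rw [show walk (c :: rest) (Trie.node false ch)
              = (match findChild ch c with | some t => walk rest t | none => false) from by
            simp [walk]]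
        rw [children_iff rest c ih ch hwc]
        simp [words]

theorem findChild_wf : ∀ (ch : TChildren), wfC ch = true →
    ∀ (c : Char) (t0 : Trie), findChild ch c = some t0 → wfT t0 = true
  | .nil, _, c, t0 => by simp [findChild]
  | .cons k t ch, hwf, c, t0 => by
      have hcomp : (hasKey ch k = false ∧ wfT t = true) ∧ wfC ch = true := by
        simpa [wfC, Bool.and_eq_true, Bool.not_eq_true'] using hwf
      obtain ⟨⟨_, hwt⟩, hwc⟩ := hcomp
      by_cases h : k = c
      · simp only [findChild, if_pos h]
        rintro ⟨rfl⟩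
        exact hwt
      · simp only [findChild, if_neg h]
        exact findChild_wf ch hwc c t0

theorem mem_wordsC_iff_child : ∀ (ch : TChildren), wfC ch = true →
    ∀ (c : Char) (w₀ : List Char),
      ((c :: w₀) ∈ wordsC ch ↔ ∃ t0, findChild ch c = some t0 ∧ w₀ ∈ words t0)
  | .nil, _, c, w₀ => by simp [wordsC, findChild]
  | .cons k t ch, hwf, c, w₀ => by
      have hcomp : (hasKey ch k = false ∧ wfT t = true) ∧ wfC ch = true := by
        simpa [wfC, Bool.and_eq_true, Bool.not_eq_true'] using hwf
      obtain ⟨⟨hkey, hwt⟩, hwc⟩ := hcomp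
      simp only [wordsC, List.mem_append, List.mem_map]
      by_cases h : k = c
      · subst h
        constructor
        · rintro (⟨x, hx, hkx⟩ | hm)
          · have hx' : x = w₀ := by injection hkx
            subst hx'
            exact ⟨t, by simp [findChild], hx⟩
          · exact absurd (head_mem_wordsC ch _ w₀ hm) (by simp [hkey])
        · rintro ⟨t0, ht0, hw0⟩
          have ht : t = t0 := by simpa [findChild] using ht0
          subst ht
          exact Or.inl ⟨w₀, hw0, rfl⟩
      · simp only [findChild, if_neg h]
        rw [← mem_wordsC_iff_child ch hwc c w₀]
        constructor
        · rintro (⟨x, hx, hkx⟩ | hm)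
          · exact absurd (by injection hkx) h
          · exact hm
        · exact Or.inr

theorem hasKey_setChild : ∀ (ch : TChildren) (c : Char) (t' : Trie) (x : Char),
    hasKey (setChild ch c t') x = (hasKey ch x || c == x)
  | .nil, c, t', x => by simp [setChild, hasKey]
  | .cons k t0 ch, c, t', x => by
      by_cases h : k = c
      · subst h
        cases hk : (k == x) <;> simp [setChild, hasKey, hk]
      · have hrec := hasKey_setChild ch c t' x
        cases hk : (k == x) <;> simp [setChild, if_neg h, hasKey, hk, hrec]

theorem wfC_setChild : ∀ (ch : TChildren), wfC ch = true →
    ∀ (c : Char) (t' : Trie), wfT t' = true → wfC (setChild ch c t') = true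
  | .nil, _, c, t', hwt' => by simp [setChild, wfC, hasKey, hwt']
  | .cons k t0 ch, hwf, c, t', hwt' => by
      have hcomp : (hasKey ch k = false ∧ wfT t0 = true) ∧ wfC ch = true := by
        simpa [wfC, Bool.and_eq_true, Bool.not_eq_true'] using hwf
      obtain ⟨⟨hkey, hwt0⟩, hwc⟩ := hcomp
      by_cases h : k = c
      · subst h
        simp [setChild, wfC, hkey, hwt', hwc]
      · have hck : (c == k) = false := beq_eq_false_iff_ne.mpr fun e => h e.symm
        simp [setChild, if_neg h, wfC, hasKey_setChild, hkey, hck, hwt0,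
          wfC_setChild ch hwc c t' hwt']

theorem wf_empty : wfT emptyTrie = true := rfl

theorem words_empty : words emptyTrie = [] := rfl

theorem mem_words_node (b : Bool) (ch : TChildren) (m : List Char) :
    m ∈ words (Trie.node b ch) ↔ (b = true ∧ m = []) ∨ m ∈ wordsC ch := by
  cases b <;> simp [words]

theorem mem_wordsC_setChild (c : Char) (t' : Trie) :
    ∀ (ch : TChildren), wfC ch = true → ∀ (m : List Char),
      (m ∈ wordsC (setChild ch c t') ↔
        (∃ w', w' ∈ words t' ∧ m = c :: w') ∨ (m ∈ wordsC ch ∧ ∀ w₀, m ≠ c :: w₀))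
  | .nil, _, m => by simp [setChild, wordsC, eq_comm]
  | .cons k t0 ch, hwf, m => by
      have hcomp : (hasKey ch k = false ∧ wfT t0 = true) ∧ wfC ch = true := by
        simpa [wfC, Bool.and_eq_true, Bool.not_eq_true'] using hwf
      obtain ⟨⟨hkey, hwt0⟩, hwc⟩ := hcomp
      by_cases h : k = c
      · subst h
        simp only [setChild, reduceIte, wordsC, List.mem_append, List.mem_map]
        constructor
        · rintro (⟨x, hx, rfl⟩ | hm)
          · exact Or.inl ⟨x, hx, rfl⟩
          · refine Or.inr ⟨Or.inr hm, ?_⟩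
            rintro w₀ rfl
            exact absurd (head_mem_wordsC ch _ w₀ hm) (by simp [hkey])
        · rintro (⟨w', hw', rfl⟩ | ⟨hm, hnc⟩)
          · exact Or.inl ⟨w', hw', rfl⟩
          · rcases hm with ⟨x, hx, rfl⟩ | hm
            · exact absurd rfl (hnc x)
            · exact Or.inr hm
      · simp only [setChild, if_neg h, wordsC, List.mem_append, List.mem_map,
          mem_wordsC_setChild c t' ch hwc m]
        constructor
        · rintro (⟨x, hx, rfl⟩ | ⟨w', hw', rfl⟩ | ⟨hm, hnc⟩)
          · refine Or.inr ⟨Or.inl ⟨x, hx, rfl⟩, ?_⟩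
            rintro w₀ he
            exact h (by injection he)
          · exact Or.inl ⟨w', hw', rfl⟩
          · exact Or.inr ⟨Or.inr hm, hnc⟩
        · rintro (⟨w', hw', rfl⟩ | ⟨⟨x, hx, rfl⟩ | hm, hnc⟩)
          · exact Or.inr (Or.inl ⟨w', hw', rfl⟩)
          · exact Or.inl ⟨x, hx, rfl⟩
          · exact Or.inr (Or.inr ⟨hm, hnc⟩)

theorem wfT_insert : ∀ (w : List Char) (t : Trie), wfT t = true →
    wfT (trieInsert t w) = true := by
  intro w
  induction w with
  | nil =>
    intro t hw
    cases t with
    | node b ch => simpa [trieInsert, wfT] using hw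
  | cons c rest ih =>
    intro t hw
    cases t with
    | node b ch =>
      have hwc : wfC ch = true := by simpa [wfT] using hw
      have hchild : wfT ((findChild ch c).getD emptyTrie) = true := by
        cases hf : findChild ch c with
        | none => exact wf_empty
        | some t0 => exact findChild_wf ch hwc c t0 hf
      simpa [trieInsert, wfT] using
        wfC_setChild ch hwc c _ (ih _ hchild)

theorem mem_words_insert : ∀ (w : List Char) (t : Trie), wfT t = true →
    ∀ (m : List Char), (m ∈ words (trieInsert t w) ↔ m = w ∨ m ∈ words t) := by
  intro w
  induction w with
  | nil =>
    intro t hw m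
    cases t with
    | node b ch =>
      simp only [trieInsert, mem_words_node]
      constructor
      · rintro (⟨_, rfl⟩ | hm)
        · exact Or.inl rfl
        · exact Or.inr (Or.inr hm)
      · rintro (rfl | ⟨_, rfl⟩ | hm)
        · exact Or.inl ⟨trivial, rfl⟩
        · exact Or.inl ⟨trivial, rfl⟩
        · exact Or.inr hm
  | cons c rest ih =>
    intro t hw m
    cases t with
    | node b ch =>
      have hwc : wfC ch = true := by simpa [wfT] using hw
      have hchild : wfT ((findChild ch c).getD emptyTrie) = true := by
        cases hf : findChild ch c with
        | none => exact wf_empty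
        | some t0 => exact findChild_wf ch hwc c t0 hf
      simp only [trieInsert, mem_words_node,
        mem_wordsC_setChild c _ ch hwc m]
      constructor
      · rintro (hb | ⟨w', hw', rfl⟩ | ⟨hm, _⟩)
        · exact Or.inr (Or.inl hb)
        · rcases (ih _ hchild w').mp hw' with rfl | hw''
          · exact Or.inl rfl
          · refine Or.inr (Or.inr ?_)
            cases hf : findChild ch c with
            | none => simp [hf, words_empty] at hw''
            | some t0 =>
              rw [hf] at hw''
              exact (mem_wordsC_iff_child ch hwc c w').mpr ⟨t0, hf, hw''⟩
        · exact Or.inr (Or.inr hm)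
      · rintro (rfl | hb | hm)
        · exact Or.inr (Or.inl ⟨rest, (ih _ hchild rest).mpr (Or.inl rfl), rfl⟩)
        · exact Or.inl hb
        · rcases m with _ | ⟨c₀, w₀⟩
          · exact absurd hm (wordsC_ne_nil ch)
          · by_cases hc : c₀ = c
            · subst hc
              obtain ⟨t0, hf, hw0⟩ := (mem_wordsC_iff_child ch hwc c₀ w₀).mp hm
              refine Or.inr (Or.inl ⟨w₀, (ih _ hchild w₀).mpr (Or.inr ?_), rfl⟩)
              simp [hf]
              exact hw0
            · refine Or.inr (Or.inr ⟨hm, ?_⟩)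
              rintro w₀' he
              exact hc (by injection he)

theorem wf_fold : ∀ (ws : List (List Char)) (t : Trie), wfT t = true →
    wfT (ws.foldl trieInsert t) = true := by
  intro ws
  induction ws with
  | nil => intro t hw; simpa using hw
  | cons w ws ih =>
    intro t hw
    simpa [List.foldl] using ih _ (wfT_insert w t hw)

theorem mem_words_fold : ∀ (ws : List (List Char)) (t : Trie), wfT t = true →
    ∀ (m : List Char), (m ∈ words (ws.foldl trieInsert t) ↔ m ∈ ws ∨ m ∈ words t) := by
  intro ws
  induction ws with
  | nil => intro t hw m; simp
  | cons w ws ih =>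
    intro t hw m
    rw [List.foldl_cons, ih _ (wfT_insert w t hw) m, mem_words_insert w t hw m]
    simp only [List.mem_cons]
    tauto

theorem wf_built : wfT builtTrie = true :=
  wf_fold crashMarkersB emptyTrie wf_empty

theorem mem_built (m : List Char) : m ∈ words builtTrie ↔ m ∈ crashMarkersB := by
  have h := mem_words_fold crashMarkersB emptyTrie wf_empty m
  simpa [builtTrie, words_empty] using h

theorem markersA_eq_B : crashMarkersA = crashMarkersB := rfl

theorem markers_ne_nil : ∀ m ∈ crashMarkersA, m ≠ [] := by decide

theorem any_walk_eq (l : List Char) :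
    ((List.range l.length).any fun i => walk (l.drop i) builtTrie)
      = crashMarkersA.any (fun m => PySem.Chars.isIn m l) := by
  rw [Bool.eq_iff_iff, List.any_eq_true, List.any_eq_true]
  constructor
  · rintro ⟨i, _, hw⟩
    obtain ⟨m, hm, hp⟩ := (walk_iff _ _ wf_built).mp hw
    have hmA : m ∈ crashMarkersA := by
      rw [markersA_eq_B]; exact (mem_built m).mp hm
    exact ⟨m, hmA, (PySem.Chars.exists_prefix_drop_iff_isIn m l).mp ⟨i, hp⟩⟩
  · rintro ⟨m, hm, hin⟩
    obtain ⟨j, hp⟩ := (PySem.Chars.exists_prefix_drop_iff_isIn m l).mpr hin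
    have hj : j < l.length := by
      by_contra hge
      push_neg at hge
      rw [List.drop_eq_nil_of_le hge, List.prefix_nil] at hp
      exact markers_ne_nil m hm hp
    have hw : walk (l.drop j) builtTrie = true :=
      (walk_iff _ _ wf_built).mpr ⟨m, (mem_built m).mpr (markersA_eq_B ▸ hm), hp⟩
    exact ⟨j, List.mem_range.mpr hj, hw⟩

-- ===== VERDICT (by name: the statement is the Claim_ definition above) =====
theorem infer_status_from_log_spec : Claim_equal_infer_status_from_log := by
  intro text _
  unfold Spec_infer_status_from_log infer_status_from_log infer_status_from_log_alt
  simp only [any_walk_eq]
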